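-- pv_equiv track=rewrite | github.com/Lopes30787/Advent-of-Code-2024 | Day 7/Day7_Part2.py | check_calculation
-- ===== SOURCE A (Python) =====
-- def check_calculation(result, numbers, operations):
--     res = numbers[0]
--
--     all_concat = True
--     alter = True
--
--     for i in range(1, len(numbers)):
--         if operations[i-1] == "x":
--             all_concat = False
--             res *= numbers[i]
--
--         elif operations[i-1] == "+":
--             all_concat = False
--             res += numbers[i]
--
--         else:
--             res = int(str(res) + str(numbers[i]))
--
--     if operations[len(operations)-1] == "|":
--         operations[len(operations)-1] = "x"
--
--     elif operations[len(operations)-1] == "x":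
--         operations[len(operations)-1] = "+"
--         alter = False
--
--     else:
--         operations[len(operations)-1] = "|"
--         alter = False
--
--     for i in range(len(operations)-2, -1, -1):
--         if alter:
--             if operations[i] == "|":
--                 operations[i] = "x"
--
--             elif operations[i] == "x":
--                 operations[i] = "+"
--                 alter = False
--
--             else:
--                 operations[i] = "|"
--                 alter = False
--         else:
--             break
--
--     if res == result:
--         return True, operations, all_concat
--
--     return False, operations, all_concat
-- ===== SOURCE B (Python) =====
-- def _eval(res, flag, pairs):
--     # left-to-right evaluation by structural recursion instead of an index loop
--     if not pairs:
--         return res, flag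
--     (num, op), rest = pairs[0], pairs[1:]
--     if op == "x":
--         return _eval(res * num, False, rest)
--     if op == "+":
--         return _eval(res + num, False, rest)
--     return _eval(int(str(res) + str(num)), flag, rest)
--
--
-- def _succ(ops):
--     # increment the operator word: recurse to the end first and propagate a
--     # "the whole suffix rolled over" flag back up; no backward scan, no break,
--     # no special case for the last element.
--     if not ops:
--         return [], True
--     head, rest = ops[0], ops[1:]
--     tail, rolled = _succ(rest)
--     if not rolled:
--         return [head] + tail, False
--     if head == "|":
--         return ["x"] + tail, True
--     return [("+" if head == "x" else "|")] + tail, False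
--
--
-- def check_calculation(result, numbers, operations):
--     res, all_concat = _eval(numbers[0], True, list(zip(numbers[1:], operations)))
--     operations[:] = _succ(operations)[0]
--     return res == result, operations, all_concat
-- ===== Notes on version B (the rewrite author's own statement) =====
-- stated objective: alternative
-- what changed: A's two imperative index loops with in-place assignment, an `alter` flag, a special-cased last element and a backward scan with break are replaced by two pure structural recursions: evaluation recurses over the zipped (number, operator) pairs, and the successor of the operator word is computed by one forward recursion that rebuilds the list on the way back up, propagating a 'suffix rolled over' boolean upward instead of scanning backward with a mutable flag.
import Mathlib
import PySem

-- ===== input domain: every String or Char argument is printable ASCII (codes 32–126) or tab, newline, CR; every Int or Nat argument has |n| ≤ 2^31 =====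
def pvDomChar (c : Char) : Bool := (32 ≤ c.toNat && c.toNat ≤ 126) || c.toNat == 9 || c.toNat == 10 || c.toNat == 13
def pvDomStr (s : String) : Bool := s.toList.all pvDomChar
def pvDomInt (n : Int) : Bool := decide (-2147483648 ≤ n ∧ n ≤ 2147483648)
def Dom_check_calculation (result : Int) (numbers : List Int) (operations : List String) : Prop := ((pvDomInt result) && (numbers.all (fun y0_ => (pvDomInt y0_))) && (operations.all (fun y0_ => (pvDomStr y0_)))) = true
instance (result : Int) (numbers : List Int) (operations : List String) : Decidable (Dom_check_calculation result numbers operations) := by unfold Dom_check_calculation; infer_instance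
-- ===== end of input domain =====

-- B replaces A's two imperative index loops (mutation, `alter` flag, special-cased last element,
-- backward scan with break) by two pure structural recursions: evaluation over the zipped pairs,
-- and a forward recursion computing the successor operator word, propagating a "suffix rolled
-- over" boolean upward (objective: alternative, same cost). In Python both A and B mutate
-- `operations` in place; the equivalence proved here is about the returned triple (which
-- contains the final list).

-- ===== PORT A =====
-- int(str(a) + str(b)) (literal subexpression of both Pythons; the .getD 0 default is
-- unreachable under Pre_, which makes b nonnegative at every concatenation step)
def pvConcat (a b : Int) : Int := (PySem.Int.ofChars? (PySem.Int.toChars a ++ PySem.Int.toChars b)).getD 0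

-- body of A's `for i in range(1, len(numbers))` loop
def evalStepA (numbers : List Int) (operations : List String) (st : Int × Bool) (i : Int) : Int × Bool :=
  if PySem.List.pyGetD operations (i - 1) "" = "x" then (st.1 * PySem.List.pyGetD numbers i 0, false)
  else if PySem.List.pyGetD operations (i - 1) "" = "+" then (st.1 + PySem.List.pyGetD numbers i 0, false)
  else (pvConcat st.1 (PySem.List.pyGetD numbers i 0), st.2)

-- body of A's `for i in range(len(operations)-2, -1, -1)` loop; A's `break` makes the body
-- the identity once `alter` is false
def carryStep (st : List String × Bool) (i : Int) : List String × Bool :=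
  if st.2 then
    if PySem.List.pyGetD st.1 i "" = "|" then (PySem.List.pySetD st.1 i "x", true)
    else if PySem.List.pyGetD st.1 i "" = "x" then (PySem.List.pySetD st.1 i "+", false)
    else (PySem.List.pySetD st.1 i "|", false)
  else st

-- `res`/`all_concat` after A's first loop
def evalA (numbers : List Int) (operations : List String) : Int × Bool :=
  (PySem.List.pyRange 1 (numbers.length : Int) 1).foldl (evalStepA numbers operations)
    (PySem.List.pyGetD numbers 0 0, true)

-- A's increment: the special-cased last element, then the downward carry loop
def incA (operations : List String) : List String × Bool :=
  (PySem.List.pyRange ((operations.length : Int) - 2) (-1) (-1)).foldl carryStep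
    (if PySem.List.pyGetD operations ((operations.length : Int) - 1) "" = "|" then
        (PySem.List.pySetD operations ((operations.length : Int) - 1) "x", true)
      else if PySem.List.pyGetD operations ((operations.length : Int) - 1) "" = "x" then
        (PySem.List.pySetD operations ((operations.length : Int) - 1) "+", false)
      else (PySem.List.pySetD operations ((operations.length : Int) - 1) "|", false))

def check_calculation (result : Int) (numbers : List Int) (operations : List String) : Bool × List String × Bool :=
  (decide ((evalA numbers operations).1 = result), (incA operations).1, (evalA numbers operations).2)

-- ===== PORT B =====
-- Source B's `_eval`: evaluation by structural recursion over the zipped pairs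
def evalRecB : Int → Bool → List (Int × String) → Int × Bool
  | res, flag, [] => (res, flag)
  | res, flag, p :: rest =>
    if p.2 = "x" then evalRecB (res * p.1) false rest
    else if p.2 = "+" then evalRecB (res + p.1) false rest
    else evalRecB (pvConcat res p.1) flag rest

-- Source B's `_succ`: forward recursion rebuilding the operator word, returning the new suffix
-- together with a "the whole suffix rolled over" flag
def succB : List String → List String × Bool
  | [] => ([], true)
  | s :: rest =>
    let p := succB rest
    if p.2 = false then (s :: p.1, false)
    else if s = "|" then ("x" :: p.1, true)
    else ((if s = "x" then "+" else "|") :: p.1, false)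

def check_calculation_alt (result : Int) (numbers : List Int) (operations : List String) : Bool × List String × Bool :=
  let ev := evalRecB (PySem.List.pyGetD numbers 0 0) true
      ((PySem.List.slice numbers (some 1) none).zip operations)
  (decide (ev.1 = result), (succB operations).1, ev.2)

-- ===== PRECONDITION & SPEC =====
-- Pre_ = exactly the inputs on which Python A returns: numbers nonempty (else IndexError at
-- numbers[0]), operations nonempty (else IndexError at operations[len(operations)-1]),
-- operations long enough for the loop's operations[i-1] reads (else IndexError), and every
-- concatenation step (operator not "x"/"+") gets a nonnegative right operand (else
-- int(str(res)+str(num)) raises ValueError on the embedded minus sign).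
def Pre_check_calculation (result : Int) (numbers : List Int) (operations : List String) : Prop :=
  numbers ≠ [] ∧ operations ≠ [] ∧ numbers.length ≤ operations.length + 1 ∧
  ∀ p ∈ (numbers.drop 1).zip operations, (p.2 ≠ "x" ∧ p.2 ≠ "+") → 0 ≤ p.1
instance (result : Int) (numbers : List Int) (operations : List String) : Decidable (Pre_check_calculation result numbers operations) := by unfold Pre_check_calculation; infer_instance

def pvWitness_check_calculation : Int × List Int × List String := (10, [2, 5], ["x"])

def Spec_check_calculation (result : Int) (numbers : List Int) (operations : List String) (out : Bool × List String × Bool) : Prop := out = check_calculation_alt result numbers operations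
instance (result : Int) (numbers : List Int) (operations : List String) (out : Bool × List String × Bool) : Decidable (Spec_check_calculation result numbers operations out) := by unfold Spec_check_calculation; infer_instance

-- ===== CLAIM (what is proved, stated in full; the proofs are below) =====
def Claim_equal_check_calculation : Prop := ∀ (result : Int) (numbers : List Int) (operations : List String), Dom_check_calculation result numbers operations → Pre_check_calculation result numbers operations → Spec_check_calculation result numbers operations (check_calculation result numbers operations)


-- ===== LEMMAS AND PROOFS =====

-- the successor rule on the digit at which the carry stops
def bump (s : String) : String := if s = "x" then "+" else "|"

-- the odometer step on the REVERSED operator list; both A's carry loop and B's forward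
-- recursion are proved equal to it
def incRev : List String → List String
  | [] => []
  | s :: rest => if s = "|" then "x" :: incRev rest else bump s :: rest

-- the per-pair evaluation step, shared shape of both evaluation loops (proof helper)
def evalStepB (st : Int × Bool) (p : Int × String) : Int × Bool :=
  if p.2 = "x" then (st.1 * p.1, false)
  else if p.2 = "+" then (st.1 + p.1, false)
  else (pvConcat st.1 p.1, st.2)

lemma carry_false (l : List Int) (ops : List String) :
    l.foldl carryStep (ops, false) = (ops, false) := by
  induction l generalizing ops with
  | nil => rfl
  | cons a l ih => simpa [carryStep] using ih ops

lemma drop_set_self (l : List String) (i : Nat) (v : String) (h : i < l.length) :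
    (l.set i v).drop i = v :: l.drop (i+1) := by
  rw [List.set_eq_take_cons_drop v h]
  rw [List.drop_append_of_le_length (by simp [h.le])]
  simp

lemma carry_step_true (ops : List String) (k : Nat) (hk : k < ops.length) :
    carryStep (ops, true) (k : Int)
      = if ops[k] = "|" then (ops.set k "x", true) else (ops.set k (bump ops[k]), false) := by
  simp only [carryStep, PySem.List.pyGetD_natCast, PySem.List.pySetD_natCast, bump,
    List.getD_eq_getElem _ _ hk]
  split_ifs <;> simp_all

-- A's downward carry loop from index k computes incRev on the reversed (k+1)-prefix
lemma carry_fold (k : Nat) (ops : List String) (hk : k < ops.length) :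
    (PySem.List.pyRange (k : Int) (-1) (-1)).foldl carryStep (ops, true)
      = ((incRev (ops.take (k + 1)).reverse).reverse ++ ops.drop (k + 1),
         (ops.take (k + 1)).all (· == "|")) := by
  induction k generalizing ops with
  | zero =>
    rw [PySem.List.pyRange_neg_one_cons (by norm_num), show ((0:Nat):Int) - 1 = (-1:Int) by norm_num,
      PySem.List.pyRange_neg_one_eq_nil (le_refl _)]
    simp only [List.foldl_cons, List.foldl_nil, carry_step_true ops 0 hk]
    have ht : ops.take 1 = [ops[0]] := by simpa using List.take_succ_eq_append_getElem hk
    have hs : ∀ v, ops.set 0 v = v :: ops.drop 1 := fun v => by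
      simpa using List.set_eq_take_cons_drop v hk
    by_cases h : ops[0] = "|" <;> simp [h, ht, hs, incRev]
  | succ j ih =>
    have hj1 : ((j+1 : Nat) : Int) - 1 = ((j : Nat) : Int) := by push_cast; ring
    rw [PySem.List.pyRange_neg_one_cons (by omega)]
    simp only [List.foldl_cons, carry_step_true ops (j+1) hk, hj1]
    by_cases h : ops[j+1] = "|"
    · simp only [h, reduceIte]
      rw [ih (ops.set (j+1) "x") (by simp; omega)]
      have htk : (ops.set (j+1) "x").take (j+1) = ops.take (j+1) :=
        List.take_set_of_le (le_refl _)
      have hT : ops.take (j+1+1) = ops.take (j+1) ++ [ops[j+1]] :=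
        List.take_succ_eq_append_getElem hk
      have hD : (ops.set (j+1) "x").drop (j+1) = "x" :: ops.drop (j+2) := drop_set_self ops (j+1) "x" hk
      rw [htk, hD, hT]
      simp [incRev, h, List.all_append]
    · simp only [h, reduceIte]
      rw [carry_false]
      have hT : ops.take (j+1+1) = ops.take (j+1) ++ [ops[j+1]] :=
        List.take_succ_eq_append_getElem hk
      have hS : ops.set (j+1) (bump ops[j+1]) = ops.take (j+1) ++ bump ops[j+1] :: ops.drop (j+2) :=
        List.set_eq_take_cons_drop _ hk
      refine Prod.ext ?_ ?_
      · rw [hS, hT, List.reverse_append]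
        have hinc : incRev (ops[j+1] :: (List.take (j+1) ops).reverse)
            = bump ops[j+1] :: (List.take (j+1) ops).reverse := by
          simp [incRev, h]
        simp only [List.reverse_cons, List.reverse_nil, List.nil_append, List.singleton_append]
        rw [hinc]
        simp only [List.reverse_cons, List.reverse_reverse, List.append_assoc, List.singleton_append]
      · rw [hT]
        simp only [List.all_append]
        simp [h]

-- incRev touches only the leading run of "|" and the element after it (two cases)
lemma incRev_append_bar (a : List String) (s : String) (h : a.all (· == "|") = true) :
    incRev (a ++ [s]) = incRev a ++ [if s = "|" then "x" else bump s] := by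
  induction a with
  | nil => by_cases hs : s = "|" <;> simp [incRev, hs, bump]
  | cons t a ih =>
    simp only [List.all_cons, Bool.and_eq_true, beq_iff_eq] at h
    obtain ⟨ht, ha⟩ := h
    subst ht
    simp [incRev, ih ha]

lemma incRev_append_nobar (a : List String) (s : String) (h : a.all (· == "|") = false) :
    incRev (a ++ [s]) = incRev a ++ [s] := by
  induction a with
  | nil => simp at h
  | cons t a ih =>
    by_cases ht : t = "|"
    · subst ht
      simp only [List.all_cons, beq_self_eq_true, Bool.true_and] at h
      simp [incRev, ih h]
    · simp [incRev, ht]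

-- B's forward recursion computes incRev of the reversed list, plus the all-"|" flag
lemma succB_eq (l : List String) :
    succB l = ((incRev l.reverse).reverse, l.all (· == "|")) := by
  induction l with
  | nil => rfl
  | cons s rest ih =>
    simp only [succB, ih, List.reverse_cons, List.all_cons]
    by_cases hall : rest.all (· == "|") = true
    · have ha : (rest.reverse.all (· == "|")) = true := by rw [List.all_reverse]; exact hall
      rw [incRev_append_bar _ _ ha]
      by_cases hs : s = "|"
      · simp [hs, hall]
      · have hsb : (s == "|") = false := by simpa using hs
        simp [hs, hsb, hall, bump]
    · have hf : rest.all (· == "|") = false := by simpa using hall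
      have ha : (rest.reverse.all (· == "|")) = false := by rw [List.all_reverse]; exact hf
      rw [incRev_append_nobar _ _ ha]
      simp [hf]

-- recursion ↔ fold for the evaluation
lemma evalRecB_foldl (l : List (Int × String)) (res : Int) (flag : Bool) :
    evalRecB res flag l = l.foldl evalStepB (res, flag) := by
  induction l generalizing res flag with
  | nil => rfl
  | cons p rest ih =>
    simp only [evalRecB, List.foldl_cons, evalStepB]
    split_ifs <;> exact ih _ _

-- the two evaluation loops agree under Pre_'s length condition
lemma eval_eq (numbers : List Int) (operations : List String)
    (hlen : numbers.length ≤ operations.length + 1) :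
    ∀ (d k : Nat) (st : Int × Bool), numbers.length ≤ k + d → 1 ≤ k →
    (PySem.List.pyRange (k : Int) (numbers.length : Int) 1).foldl (evalStepA numbers operations) st
      = ((numbers.drop k).zip (operations.drop (k - 1))).foldl evalStepB st := by
  intro d
  induction d with
  | zero =>
    intro k st hkd _
    rw [PySem.List.pyRange_one_eq_nil (by exact_mod_cast by omega)]
    rw [List.drop_eq_nil_of_le (by omega)]
    rfl
  | succ d ih =>
    intro k st hkd hk1
    by_cases hk : numbers.length ≤ k
    · rw [PySem.List.pyRange_one_eq_nil (by exact_mod_cast hk)]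
      rw [List.drop_eq_nil_of_le hk]
      rfl
    · push_neg at hk
      have h2 : k - 1 < operations.length := by omega
      rw [PySem.List.pyRange_one_cons (by exact_mod_cast hk)]
      rw [List.drop_eq_getElem_cons hk]
      rw [List.drop_eq_getElem_cons h2]
      have hk1' : (k - 1) + 1 = k := by omega
      rw [hk1']
      simp only [List.zip_cons_cons, List.foldl_cons]
      have hstep : evalStepA numbers operations st (k : Int)
          = evalStepB st (numbers[k], operations[k - 1]) := by
        simp only [evalStepA, evalStepB,
          show (k : Int) - 1 = ((k - 1 : Nat) : Int) by omega,
          PySem.List.pyGetD_natCast,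
          List.getD_eq_getElem _ _ hk, List.getD_eq_getElem _ _ h2]
      rw [hstep]
      rw [show (k : Int) + 1 = ((k + 1 : Nat) : Int) by push_cast; ring]
      rw [ih (k + 1) _ (by omega) (by omega)]
      rw [show (k + 1) - 1 = k by omega]

-- ===== VERDICT (by name: the statement is the Claim_ definition above) =====
theorem check_calculation_spec : Claim_equal_check_calculation := by
  intro result numbers operations _ hpre
  obtain ⟨hn, ho, hlen, -⟩ := hpre
  have hL : 1 ≤ operations.length := List.length_pos_of_ne_nil ho
  have heval : evalA numbers operations
      = evalRecB (PySem.List.pyGetD numbers 0 0) true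
          ((PySem.List.slice numbers (some 1) none).zip operations) := by
    unfold evalA
    have h1 := eval_eq numbers operations hlen numbers.length 1
      (PySem.List.pyGetD numbers 0 0, true) (by omega) (by omega)
    rw [Nat.cast_one] at h1
    rw [h1]
    have hsl : PySem.List.slice numbers (some 1) none = numbers.drop 1 := by
      simpa using PySem.List.slice_from_natCast (xs := numbers) (a := 1)
    rw [hsl, evalRecB_foldl]
    simp
  have hops : (incA operations).1 = (succB operations).1 := by
    unfold incA
    have hcast : ((operations.length - 1 : Nat) : Int) = (operations.length : Int) - 1 := by omega
    have hcast2 : (operations.length : Int) - 2 = ((operations.length - 1 : Nat) : Int) - 1 := by omega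
    have hk : operations.length - 1 < operations.length := by omega
    have hst0 :
        (if PySem.List.pyGetD operations ((operations.length : Int) - 1) "" = "|" then
            (PySem.List.pySetD operations ((operations.length : Int) - 1) "x", true)
          else if PySem.List.pyGetD operations ((operations.length : Int) - 1) "" = "x" then
            (PySem.List.pySetD operations ((operations.length : Int) - 1) "+", false)
          else (PySem.List.pySetD operations ((operations.length : Int) - 1) "|", false))
          = carryStep (operations, true) ((operations.length : Int) - 1) := by
      simp [carryStep]
    rw [hst0, hcast2, ← hcast]
    rw [show carryStep (operations, true) (((operations.length - 1 : Nat) : Int))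
          = List.foldl carryStep (operations, true) [((operations.length - 1 : Nat) : Int)] from rfl]
    rw [← List.foldl_append, List.singleton_append]
    rw [← PySem.List.pyRange_neg_one_cons (a := ((operations.length - 1 : Nat) : Int)) (b := -1) (by omega)]
    rw [carry_fold (operations.length - 1) operations hk]
    have htk : operations.take (operations.length - 1 + 1) = operations := by
      rw [List.take_of_length_le (by omega)]
    have hdr : operations.drop (operations.length - 1 + 1) = [] := by
      rw [List.drop_eq_nil_of_le (by omega)]
    rw [htk, hdr]
    rw [succB_eq]
    simp
  unfold Spec_check_calculation check_calculation check_calculation_alt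
  rw [heval, hops]
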